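-- pv_equiv track=rewrite | github.com/guilhermefmk/Engenharia-de-dados-AWS---PB-Compass.uol | Sprint5 - Apache Spark Streaming/Semana1/desafio/2018_raw_ref.py | get_emogi
-- ===== SOURCE A (Python) =====
-- def get_emogi(text):
--     emojis = [':D',':)',':]',':}',':c',':(',':[',':{']
--     index = 1000
--     emoji_r = ''
--     for emoji in emojis:
--         temp = text.find(emoji)
--         if temp < index and temp != -1:
--             emoji_r = emoji
--             index = temp
--     return emoji_r
-- ===== SOURCE B (Python) =====
-- def get_emogi(text):
--     emojis = [':D', ':)', ':]', ':}', ':c', ':(', ':[', ':{']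
--     for i in range(len(text)):
--         for emoji in emojis:
--             if text.startswith(emoji, i):
--                 return emoji
--     return ''
-- ===== Notes on version B (the rewrite author's own statement) =====
-- stated objective: alternative
-- what changed: B scans text positions left-to-right once and returns the first emoji matching at the earliest position, instead of running find() per pattern and folding a running minimum capped at the arbitrary sentinel 1000.
-- intended difference: On texts whose earliest emoji occurrence is at position >= 1000, A returns '' (its sentinel index=1000 discards any find result >= 1000) while B returns that emoji, which is the intended earliest-occurring emoji. — e.g. on get_emogi("xxxxxxxxxxxxxxxxxxxxxxxxxxxxxxxxxxxxxxxxxxxxxxxxxxxxxxxxxxxxxxxxxxxxxxxxxxxxxxxxxxxxxxxxxxxxxxxxxxxxxxxxxxxxxxxxxxxxxx…): A returns "", B returns ":)"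
import Mathlib
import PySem

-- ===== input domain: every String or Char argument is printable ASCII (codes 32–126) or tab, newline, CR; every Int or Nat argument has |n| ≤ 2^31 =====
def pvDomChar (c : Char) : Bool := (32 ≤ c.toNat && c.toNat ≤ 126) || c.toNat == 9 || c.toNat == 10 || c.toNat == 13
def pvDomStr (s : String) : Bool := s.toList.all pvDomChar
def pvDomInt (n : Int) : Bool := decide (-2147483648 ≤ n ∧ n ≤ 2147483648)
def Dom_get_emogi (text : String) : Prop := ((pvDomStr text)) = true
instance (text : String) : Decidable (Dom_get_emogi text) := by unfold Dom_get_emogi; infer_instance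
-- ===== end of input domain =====

-- B replaces A's per-pattern find()+running-minimum fold by a single left-to-right scan of text
-- positions returning the first emoji that matches; on texts whose earliest emoji occurrence is at
-- position ≥ 1000 A's sentinel `index = 1000` makes it return '' — B returns that emoji (D_ below).

-- ===== PORT A =====
def get_emogi (text : String) : String :=
  let emojis : List String := [":D", ":)", ":]", ":}", ":c", ":(", ":[", ":{"]
  (emojis.foldl (fun (st : Int × String) (emoji : String) =>
      let temp := PySem.Str.find text emoji
      if temp < st.1 ∧ temp ≠ -1 then (temp, emoji) else st)
    ((1000 : Int), "")).2

-- ===== PORT B =====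
-- `text.startswith(emoji, i)` with 0 ≤ i < len(text) is ported as a prefix test on
-- `text.toList.drop i` (exact for these i); `for … return` becomes findSome?/find?.
def get_emogi_alt (text : String) : String :=
  let emojis : List String := [":D", ":)", ":]", ":}", ":c", ":(", ":[", ":{"]
  match (List.range text.toList.length).findSome? (fun i =>
      emojis.find? (fun emoji => PySem.Chars.startswith (text.toList.drop i) emoji.toList)) with
  | some e => e
  | none => ""

-- ===== PRECONDITION & SPEC =====
-- On texts whose earliest emoji occurrence is at position ≥ 1000, A returns '' (its sentinel
-- index=1000 discards any find() result ≥ 1000) while B returns that earliest emoji, which is the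
-- intended result for this function.
-- a position matches iff its char is ':' and the next char is one of the 8 second characters
def pvSecond : List Char := ['D', ')', ']', '}', 'c', '(', '[', '{']
def pvPair (p : Char × Char) : Bool := p.1 == ':' && pvSecond.contains p.2
def D_get_emogi (text : String) : Prop :=
  (pvSecond.any (fun c => PySem.Chars.isIn [':', c] text.toList)) = true ∧
  (((text.toList.take 1001).zip (text.toList.take 1001).tail).any pvPair) = false
instance (text : String) : Decidable (D_get_emogi text) := by unfold D_get_emogi; infer_instance

def Spec_get_emogi (text : String) (out : String) : Prop := ¬ D_get_emogi text → out = get_emogi_alt text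
instance (text : String) (out : String) : Decidable (Spec_get_emogi text out) := by unfold Spec_get_emogi; infer_instance

def pvDiffWitness_get_emogi : String := "xxxxxxxxxxxxxxxxxxxxxxxxxxxxxxxxxxxxxxxxxxxxxxxxxxxxxxxxxxxxxxxxxxxxxxxxxxxxxxxxxxxxxxxxxxxxxxxxxxxxxxxxxxxxxxxxxxxxxxxxxxxxxxxxxxxxxxxxxxxxxxxxxxxxxxxxxxxxxxxxxxxxxxxxxxxxxxxxxxxxxxxxxxxxxxxxxxxxxxxxxxxxxxxxxxxxxxxxxxxxxxxxxxxxxxxxxxxxxxxxxxxxxxxxxxxxxxxxxxxxxxxxxxxxxxxxxxxxxxxxxxxxxxxxxxxxxxxxxxxxxxxxxxxxxxxxxxxxxxxxxxxxxxxxxxxxxxxxxxxxxxxxxxxxxxxxxxxxxxxxxxxxxxxxxxxxxxxxxxxxxxxxxxxxxxxxxxxxxxxxxxxxxxxxxxxxxxxxxxxxxxxxxxxxxxxxxxxxxxxxxxxxxxxxxxxxxxxxxxxxxxxxxxxxxxxxxxxxxxxxxxxxxxxxxxxxxxxxxxxxxxxxxxxxxxxxxxxxxxxxxxxxxxxxx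xxxxxxxxxxxxxxxxxxxxxxxxxxxxxxxxxxxxxxxxxxxxxxxxxxxxxxxxxxxxxxxxxxxxxxxxxxxxxxxxxxxxxxxxxxxxxxxxxxxxxxxxxxxxxxxxxxxxxxxxxxxxxxxxxxxxxxxxxxxxxxxxxxxxxxxxxxxxxxxxxxxxxxxxxxxxxxxxxxxxxxxxxxxxxxxxxxxxxxxxxxxxxxxxxxxxxxxxxxxxxxxxxxxxxxxxxxxxxxxxxxxxxxxxxxxxxxxxxxxxxxxxxxxxxxxxxxxxxxxxxxxxxxxxxxxxxxxxxxxxxxxxxxxxxxxxxxxxxxxxxxxxxxxxxxxxxxxxxxxxxxxxxxxxxxxxxxxxxxxxxxxxxxxxxxxxxxxxxxxxxxxxxxxxxxxxxxxxxxxxxxxxxxxxxxxxxxxxxxxxxxxxxxxxxxxxxxxxxxxxxxxxxxxxxxxxxxxxxxxxxxxxxxxxxxx:)"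
def pvDiffWitnessOut_get_emogi : String × String := ("", ":)")

-- ===== CLAIM (what is proved, stated in full; the proofs are below) =====
def Claim_unchanged_get_emogi : Prop := ∀ (text : String), Dom_get_emogi text → Spec_get_emogi text (get_emogi text)
def Claim_changed_get_emogi : Prop := Dom_get_emogi (pvDiffWitness_get_emogi) ∧ D_get_emogi (pvDiffWitness_get_emogi) ∧ get_emogi (pvDiffWitness_get_emogi) = pvDiffWitnessOut_get_emogi.1 ∧ get_emogi_alt (pvDiffWitness_get_emogi) = pvDiffWitnessOut_get_emogi.2 ∧ pvDiffWitnessOut_get_emogi.1 ≠ pvDiffWitnessOut_get_emogi.2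
def Claim_exact_get_emogi : Prop := ∀ (text : String), Dom_get_emogi text → D_get_emogi text → get_emogi text ≠ get_emogi_alt text

-- ===== LEMMAS AND PROOFS =====

def pvE : List String := [":D", ":)", ":]", ":}", ":c", ":(", ":[", ":{"]

def stepA (text : String) (st : Int × String) (emoji : String) : Int × String :=
  let temp := PySem.Str.find text emoji
  if temp < st.1 ∧ temp ≠ -1 then (temp, emoji) else st

def gB (l : List Char) (i : Nat) : Option String :=
  pvE.find? (fun emoji => PySem.Chars.startswith (l.drop i) emoji.toList)

lemma pv_getA (text : String) :
    get_emogi text = (pvE.foldl (stepA text) ((1000 : Int), "")).2 := rfl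

lemma pv_getB (text : String) :
    get_emogi_alt text =
      match (List.range text.toList.length).findSome? (gB text.toList) with
      | some e => e
      | none => "" := rfl

-- position-wise match predicate (Bool-backed so Nat.find needs no new instance)
abbrev pvMatch (l : List Char) (i : Nat) : Prop :=
  (pvE.any (fun e => e.toList.isPrefixOf (l.drop i))) = true

lemma pvMatch_iff (l : List Char) (i : Nat) :
    pvMatch l i ↔ ∃ e ∈ pvE, e.toList <+: l.drop i := by
  simp [pvMatch, List.any_eq_true, List.isPrefixOf_iff_prefix]

lemma pv_infix_of_match {e : String} {l : List Char} {i : Nat} (h : e.toList <+: l.drop i) :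
    e.toList <:+: l :=
  h.isInfix.trans (List.drop_suffix i l).isInfix

lemma pv_find_ne_neg_iff (text e : String) :
    PySem.Str.find text e ≠ -1 ↔ ∃ i, e.toList <+: text.toList.drop i := by
  have hb : PySem.Str.find text e = PySem.Chars.find text.toList e.toList := by simp
  rw [hb, PySem.Chars.find_ne_neg_one_iff, ← PySem.Chars.isIn_iff_infix,
      ← PySem.Chars.exists_prefix_drop_iff_isIn]

lemma pv_LA1 (text : String) :
    ∀ (E : List String) (k : Int) (r : String),
      (∀ e ∈ E, ¬(PySem.Str.find text e < k ∧ PySem.Str.find text e ≠ -1)) →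
      E.foldl (stepA text) (k, r) = (k, r) := by
  intro E
  induction E with
  | nil => intro k r _; rfl
  | cons e E ih =>
    intro k r h
    rw [List.foldl_cons]
    have hstep : stepA text (k, r) e = (k, r) := by
      simp only [stepA]; exact if_neg (h e List.mem_cons_self)
    rw [hstep]
    exact ih k r (fun e' he' => h e' (List.mem_cons_of_mem _ he'))

lemma pv_LA2 (text : String) :
    ∀ (E : List String) (k : Int) (r : String) (p : Int),
      p ≠ -1 → p < k →
      (∀ e ∈ E, PySem.Str.find text e ≠ -1 → p ≤ PySem.Str.find text e) →
      (∃ e ∈ E, PySem.Str.find text e = p) →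
      ∃ w, E.find? (fun e => PySem.Str.find text e == p) = some w ∧
        (E.foldl (stepA text) (k, r)).2 = w := by
  intro E
  induction E with
  | nil => intro k r p _ _ _ hex; exact absurd hex (by simp)
  | cons e E ih =>
    intro k r p hne hlt hmin hex
    rw [List.foldl_cons]
    by_cases hep : PySem.Str.find text e = p
    · refine ⟨e, List.find?_cons_of_pos (by simpa using hep), ?_⟩
      have hstep : stepA text (k, r) e = (p, e) := by
        simp only [stepA]
        rw [if_pos ⟨by rw [hep]; exact hlt, by rw [hep]; exact hne⟩, hep]
      have hrest : E.foldl (stepA text) (p, e) = (p, e) := by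
        apply pv_LA1
        intro e' he' hcon
        exact absurd (hmin e' (List.mem_cons_of_mem _ he') hcon.2) (not_le.mpr hcon.1)
      rw [hstep, hrest]
    · have hfind : (e :: E).find? (fun e' => PySem.Str.find text e' == p)
          = E.find? (fun e' => PySem.Str.find text e' == p) :=
        List.find?_cons_of_neg (by simpa using hep)
      have hex' : ∃ e' ∈ E, PySem.Str.find text e' = p := by
        obtain ⟨e', he', hfe⟩ := hex
        rcases List.mem_cons.mp he' with rfl | h
        · exact absurd hfe hep
        · exact ⟨e', h, hfe⟩
      have hmin' := fun e' he' => hmin e' (List.mem_cons_of_mem _ he')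
      by_cases hu : PySem.Str.find text e < k ∧ PySem.Str.find text e ≠ -1
      · have hstep : stepA text (k, r) e = (PySem.Str.find text e, e) := by
          simp only [stepA]; rw [if_pos hu]
        have hplt : p < PySem.Str.find text e :=
          lt_of_le_of_ne (hmin e List.mem_cons_self hu.2) (fun hh => hep hh.symm)
        obtain ⟨w, hw1, hw2⟩ := ih (PySem.Str.find text e) e p hne hplt hmin' hex'
        exact ⟨w, by rw [hfind, hw1], by rw [hstep]; exact hw2⟩
      · have hstep : stepA text (k, r) e = (k, r) := by
          simp only [stepA]; exact if_neg hu
        obtain ⟨w, hw1, hw2⟩ := ih k r p hne hlt hmin' hex'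
        exact ⟨w, by rw [hfind, hw1], by rw [hstep]; exact hw2⟩

lemma pv_findSome?_range {α : Type} (g : Nat → Option α) (n p : Nat) (hp : p < n)
    (h0 : ∀ i < p, g i = none) (hs : (g p).isSome) :
    (List.range n).findSome? g = g p := by
  obtain ⟨a, ha⟩ := Option.isSome_iff_exists.mp hs
  have hn : n = p + (n - p) := by omega
  rw [hn, List.range_add, List.findSome?_append,
      List.findSome?_eq_none_iff.mpr (fun x hx => h0 x (List.mem_range.mp hx)),
      Option.none_or, List.findSome?_map]
  have h2 : n - p = (n - p - 1) + 1 := by omega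
  rw [h2, List.range_succ_eq_map, List.findSome?_cons]
  simp [ha]

lemma pv_find?_congr {α : Type} (p q : α → Bool) :
    ∀ (l : List α), (∀ a ∈ l, p a = q a) → l.find? p = l.find? q := by
  intro l h
  induction l with
  | nil => rfl
  | cons a l ih =>
    simp only [List.find?_cons, h a (List.mem_cons_self)]
    cases q a <;> simp_all

set_option maxRecDepth 4096 in
lemma pv_emoji_ne_nil : ∀ e ∈ pvE, e.toList ≠ [] := by decide
set_option maxRecDepth 4096 in
lemma pv_emoji_ne_empty : ∀ e ∈ pvE, e ≠ "" := by decide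
set_option maxRecDepth 4096 in
lemma pv_emoji_head : ∀ e ∈ pvE, e.toList.head? = some ':' := by decide
-- at the least matching position p, matching-at-p coincides with find() = p
lemma pv_find_eq_iff (text : String) {p : Nat}
    (hmin : ∀ i < p, ¬ pvMatch text.toList i) :
    ∀ e ∈ pvE, (e.toList <+: text.toList.drop p ↔ PySem.Str.find text e = (p : Int)) := by
  intro e he
  have hb : PySem.Str.find text e = PySem.Chars.find text.toList e.toList := by simp
  constructor
  · intro hpre
    have h0 : 0 ≤ PySem.Chars.find text.toList e.toList := by
      rw [PySem.Chars.find_nonneg_iff]; exact pv_infix_of_match hpre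
    have hspec := PySem.Chars.find_spec h0
    have hpm : pvMatch text.toList (PySem.Chars.find text.toList e.toList).toNat :=
      (pvMatch_iff _ _).mpr ⟨e, he, hspec.1⟩
    have h1 : ¬ (PySem.Chars.find text.toList e.toList).toNat < p :=
      fun hc => hmin _ hc hpm
    have h2 : ¬ p < (PySem.Chars.find text.toList e.toList).toNat :=
      fun hc => hspec.2 p hc hpre
    have h3 : (PySem.Chars.find text.toList e.toList).toNat = p := by omega
    rw [hb, ← Int.toNat_of_nonneg h0, h3]
  · intro hfe
    have h0 : 0 ≤ PySem.Chars.find text.toList e.toList := by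
      rw [← hb, hfe]; exact_mod_cast Nat.zero_le p
    have hspec := PySem.Chars.find_spec h0
    have h3 : (PySem.Chars.find text.toList e.toList).toNat = p := by
      rw [← hb, hfe]; exact Int.toNat_natCast p
    rw [h3] at hspec
    exact hspec.1

lemma pv_min_le_find (text : String) {p : Nat}
    (hmin : ∀ i < p, ¬ pvMatch text.toList i) :
    ∀ e ∈ pvE, PySem.Str.find text e ≠ -1 → (p : Int) ≤ PySem.Str.find text e := by
  intro e he hne
  have hb : PySem.Str.find text e = PySem.Chars.find text.toList e.toList := by simp
  obtain ⟨i, hi⟩ := (pv_find_ne_neg_iff text e).mp hne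
  have h0 : 0 ≤ PySem.Chars.find text.toList e.toList := by
    rw [PySem.Chars.find_nonneg_iff]; exact pv_infix_of_match hi
  have hspec := PySem.Chars.find_spec h0
  have hpm : pvMatch text.toList (PySem.Chars.find text.toList e.toList).toNat :=
    (pvMatch_iff _ _).mpr ⟨e, he, hspec.1⟩
  have h1 : ¬ (PySem.Chars.find text.toList e.toList).toNat < p :=
    fun hc => hmin _ hc hpm
  rw [hb, ← Int.toNat_of_nonneg h0]
  exact_mod_cast Nat.le_of_not_lt h1

-- the least matching position p : under ¬hex both return ""; with hex they agree
lemma pv_main (text : String) (hex : ∃ i, pvMatch text.toList i) :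
    ∃ w, gB text.toList (Nat.find hex) = some w ∧ get_emogi_alt text = w := by
  have hpm : pvMatch text.toList (Nat.find hex) := Nat.find_spec hex
  obtain ⟨e, he, hpre⟩ := (pvMatch_iff _ _).mp hpm
  have hplt : Nat.find hex < text.toList.length := by
    by_contra hc
    rw [List.drop_eq_nil_iff.mpr (Nat.le_of_not_lt hc)] at hpre
    exact pv_emoji_ne_nil e he (List.prefix_nil.mp hpre)
  have hg : (gB text.toList (Nat.find hex)).isSome :=
    List.find?_isSome.mpr ⟨e, he, by
      simpa using (PySem.Chars.startswith_iff _ _).mpr hpre⟩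
  have h0 : ∀ i < Nat.find hex, gB text.toList i = none := by
    intro i hi
    apply List.find?_eq_none.mpr
    intro e' he' hsw
    exact Nat.find_min hex hi
      ((pvMatch_iff _ _).mpr ⟨e', he', (PySem.Chars.startswith_iff _ _).mp (by simpa using hsw)⟩)
  obtain ⟨a, ha⟩ := Option.isSome_iff_exists.mp hg
  refine ⟨a, ha, ?_⟩
  rw [pv_getB, pv_findSome?_range _ _ _ hplt h0 hg, ha]

lemma pv_A_val (text : String) (hex : ∃ i, pvMatch text.toList i)
    (hlt : Nat.find hex < 1000) :
    ∃ w, gB text.toList (Nat.find hex) = some w ∧ get_emogi text = w := by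
  have hpm : pvMatch text.toList (Nat.find hex) := Nat.find_spec hex
  have hmin : ∀ i < Nat.find hex, ¬ pvMatch text.toList i := fun i hi => Nat.find_min hex hi
  obtain ⟨e, he, hpre⟩ := (pvMatch_iff _ _).mp hpm
  have hiff := pv_find_eq_iff text hmin
  have hfe : PySem.Str.find text e = (Nat.find hex : Int) := (hiff e he).mp hpre
  obtain ⟨w, hw1, hw2⟩ := pv_LA2 text pvE 1000 "" (Nat.find hex : Int)
    (by have : (0 : Int) ≤ (Nat.find hex : Int) := Int.natCast_nonneg _; omega)
    (by exact_mod_cast hlt)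
    (pv_min_le_find text hmin) ⟨e, he, hfe⟩
  refine ⟨w, ?_, by rw [pv_getA]; exact hw2⟩
  have hcongr := pv_find?_congr
    (fun emoji => PySem.Chars.startswith (text.toList.drop (Nat.find hex)) emoji.toList)
    (fun e' => PySem.Str.find text e' == (Nat.find hex : Int)) pvE
    (by
      intro a ha
      have hiffa := hiff a ha
      by_cases hsw : a.toList <+: text.toList.drop (Nat.find hex)
      · have h1 := (PySem.Chars.startswith_iff (text.toList.drop (Nat.find hex)) a.toList).mpr hsw
        have h2 : (PySem.Str.find text a == (Nat.find hex : Int)) = true := by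
          simpa using hiffa.mp hsw
        simp only [h1, h2]
      · have h1' : PySem.Chars.startswith (text.toList.drop (Nat.find hex)) a.toList = false :=
          Bool.eq_false_iff.mpr (fun hh => hsw ((PySem.Chars.startswith_iff _ _).mp hh))
        have h2 : (PySem.Str.find text a == (Nat.find hex : Int)) = false :=
          Bool.eq_false_iff.mpr (by
            intro hh
            exact hsw (hiffa.mpr (by simpa using hh)))
        simp only [h1', h2])
  show pvE.find? (fun emoji => PySem.Chars.startswith (text.toList.drop (Nat.find hex)) emoji.toList) = some w
  rw [hcongr, hw1]

lemma pv_A_empty (text : String)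
    (h : ∀ e ∈ pvE, PySem.Str.find text e ≠ -1 → (1000 : Int) ≤ PySem.Str.find text e) :
    get_emogi text = "" := by
  rw [pv_getA, pv_LA1 text pvE 1000 ""
    (fun e he hcon => absurd (h e he hcon.2) (not_le.mpr hcon.1))]


lemma pv_zip_getElem? {α β : Type} :
    ∀ (l : List α) (m : List β) (i : Nat),
      (l.zip m)[i]? = l[i]?.bind fun a => m[i]?.map fun b => (a, b) := by
  intro l
  induction l with
  | nil => intro m i; simp
  | cons a l ih =>
    intro m i
    cases m with
    | nil => simp
    | cons b m =>
      cases i with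
      | zero => simp
      | succ j => simpa using ih m j

lemma pv_pair_prefix (a b : Char) (m : List Char) :
    [a, b] <+: m ↔ m[0]? = some a ∧ m[1]? = some b := by
  rcases m with _ | ⟨x, m⟩
  · simp
  · rcases m with _ | ⟨y, t⟩
    · simp [List.cons_prefix_cons]
    · simp [List.cons_prefix_cons, eq_comm]

set_option maxRecDepth 4096 in
lemma pv_second_emoji : ∀ c, pvSecond.contains c = true → ∃ e ∈ pvE, e.toList = [':', c] := by
  intro c hc
  simp only [pvSecond, List.contains_eq_mem, List.mem_cons, List.not_mem_nil, or_false,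
    decide_eq_true_eq] at hc
  rcases hc with rfl | rfl | rfl | rfl | rfl | rfl | rfl | rfl
  · exact ⟨":D", by decide, by decide⟩
  · exact ⟨":)", by decide, by decide⟩
  · exact ⟨":]", by decide, by decide⟩
  · exact ⟨":}", by decide, by decide⟩
  · exact ⟨":c", by decide, by decide⟩
  · exact ⟨":(", by decide, by decide⟩
  · exact ⟨":[", by decide, by decide⟩
  · exact ⟨":{", by decide, by decide⟩

set_option maxRecDepth 4096 in
lemma pv_emoji_shape : ∀ e ∈ pvE, ∃ c, e.toList = [':', c] ∧ pvSecond.contains c = true := by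
  intro e he
  simp only [pvE, List.mem_cons, List.not_mem_nil, or_false] at he
  rcases he with rfl | rfl | rfl | rfl | rfl | rfl | rfl | rfl
  · exact ⟨'D', by decide, by decide⟩
  · exact ⟨')', by decide, by decide⟩
  · exact ⟨']', by decide, by decide⟩
  · exact ⟨'}', by decide, by decide⟩
  · exact ⟨'c', by decide, by decide⟩
  · exact ⟨'(', by decide, by decide⟩
  · exact ⟨'[', by decide, by decide⟩
  · exact ⟨'{', by decide, by decide⟩

lemma pv_D1_iff (l : List Char) :
    ((pvSecond.any (fun c => PySem.Chars.isIn [':', c] l)) = true) ↔ ∃ i, pvMatch l i := by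
  rw [List.any_eq_true]
  constructor
  · rintro ⟨c, hc, hin⟩
    obtain ⟨j, hj⟩ := (PySem.Chars.exists_prefix_drop_iff_isIn _ _).mpr hin
    obtain ⟨e, he, hlist⟩ := pv_second_emoji c (by simpa [List.contains_eq_mem] using hc)
    exact ⟨j, (pvMatch_iff _ _).mpr ⟨e, he, hlist ▸ hj⟩⟩
  · rintro ⟨i, hm⟩
    obtain ⟨e, he, hpre⟩ := (pvMatch_iff _ _).mp hm
    obtain ⟨c, hlist, hc⟩ := pv_emoji_shape e he
    exact ⟨c, by simpa [List.contains_eq_mem] using hc,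
      (PySem.Chars.exists_prefix_drop_iff_isIn _ _).mp ⟨i, hlist ▸ hpre⟩⟩

lemma pv_D2_iff (l : List Char) :
    (((l.take 1001).zip (l.take 1001).tail).any pvPair = false) ↔ ∀ i < 1000, ¬ pvMatch l i := by
  rw [List.any_eq_false]
  constructor
  · intro h i hi hm
    obtain ⟨e, he, hpre⟩ := (pvMatch_iff _ _).mp hm
    obtain ⟨c, hlist, hc⟩ := pv_emoji_shape e he
    rw [hlist, pv_pair_prefix, List.getElem?_drop, List.getElem?_drop, Nat.add_zero] at hpre
    have hz : ((l.take 1001).zip (l.take 1001).tail)[i]? = some (':', c) := by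
      rw [pv_zip_getElem?, List.getElem?_take_of_lt (by omega : i < 1001), hpre.1,
        List.getElem?_tail, List.getElem?_take_of_lt (by omega : i + 1 < 1001), hpre.2]
      rfl
    have hmem : c ∈ pvSecond := by simpa [List.contains_eq_mem] using hc
    exact h (':', c) (List.mem_of_getElem? hz) (by simp [pvPair, hmem])
  · intro h p hp hf
    obtain ⟨i, hilen, hgp⟩ := List.mem_iff_getElem.mp hp
    have hi1000 : i < 1000 := by
      simp [List.length_zip, List.length_tail, List.length_take] at hilen
      omega
    have hz : ((l.take 1001).zip (l.take 1001).tail)[i]? = some p :=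
      List.getElem?_eq_getElem hilen ▸ congrArg some hgp
    rw [pv_zip_getElem?] at hz
    obtain ⟨a, ha, hrest⟩ := Option.bind_eq_some_iff.mp hz
    obtain ⟨b, hb, hpab⟩ := Option.map_eq_some_iff.mp hrest
    rw [List.getElem?_tail, List.getElem?_take_of_lt (by omega : i + 1 < 1001)] at hb
    rw [List.getElem?_take_of_lt (by omega : i < 1001)] at ha
    rw [← hpab] at hf
    simp only [pvPair, Bool.and_eq_true, beq_iff_eq] at hf
    obtain ⟨e, he, hlist⟩ := pv_second_emoji b hf.2
    apply h i hi1000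
    refine (pvMatch_iff _ _).mpr ⟨e, he, ?_⟩
    rw [hlist, pv_pair_prefix, List.getElem?_drop, List.getElem?_drop, Nat.add_zero]
    exact ⟨by rw [ha, hf.1], hb⟩

theorem pv_spec (text : String) : ¬ D_get_emogi text → get_emogi text = get_emogi_alt text := by
  intro hD
  by_cases hex : ∃ i, pvMatch text.toList i
  · have hmin : ∀ i < Nat.find hex, ¬ pvMatch text.toList i := fun i hi => Nat.find_min hex hi
    obtain ⟨e, he, hpre⟩ := (pvMatch_iff _ _).mp (Nat.find_spec hex)
    have hlt : Nat.find hex < 1000 := by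
      by_contra hge
      apply hD
      refine ⟨(pv_D1_iff _).mpr ⟨Nat.find hex, Nat.find_spec hex⟩, (pv_D2_iff _).mpr ?_⟩
      intro i hi
      exact Nat.find_min hex (lt_of_lt_of_le hi (Nat.le_of_not_lt hge))
    obtain ⟨w, hg, hA⟩ := pv_A_val text hex hlt
    obtain ⟨w', hg', hB⟩ := pv_main text hex
    rw [hA, hB]
    rw [hg] at hg'
    exact Option.some.inj hg'
  · have hA : get_emogi text = "" := by
      apply pv_A_empty
      intro e he hne
      exfalso
      obtain ⟨i, hi⟩ := (pv_find_ne_neg_iff text e).mp hne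
      exact hex ⟨i, (pvMatch_iff _ _).mpr ⟨e, he, hi⟩⟩
    have hB : get_emogi_alt text = "" := by
      rw [pv_getB, List.findSome?_eq_none_iff.mpr ?_]
      intro i _
      apply List.find?_eq_none.mpr
      intro e' he' hsw
      exact hex ⟨i, (pvMatch_iff _ _).mpr
        ⟨e', he', (PySem.Chars.startswith_iff _ _).mp (by simpa using hsw)⟩⟩
    rw [hA, hB]

theorem pv_exact (text : String) : D_get_emogi text → get_emogi text ≠ get_emogi_alt text := by
  intro hD
  obtain ⟨hany, hall⟩ := hD
  have hex : ∃ i, pvMatch text.toList i := (pv_D1_iff _).mp hany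
  have hge : 1000 ≤ Nat.find hex := by
    by_contra hlt
    exact (pv_D2_iff _).mp hall (Nat.find hex) (by omega : Nat.find hex < 1000) (Nat.find_spec hex)
  have hA : get_emogi text = "" := by
    apply pv_A_empty
    intro e' he' hne'
    have h := pv_min_le_find text (fun i hi => Nat.find_min hex hi) e' he' hne'
    have h2 : (1000 : Int) ≤ (Nat.find hex : Int) := by exact_mod_cast hge
    omega
  obtain ⟨w, hg, hB⟩ := pv_main text hex
  have hg2 : pvE.find?
      (fun emoji => PySem.Chars.startswith (text.toList.drop (Nat.find hex)) emoji.toList)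
      = some w := hg
  have hwmem : w ∈ pvE := List.mem_of_find?_eq_some hg2
  rw [hA, hB]
  exact fun hc => pv_emoji_ne_empty w hwmem hc.symm


-- facts about the difference witness (1000 'x's followed by ":)")
set_option maxRecDepth 100000 in
set_option maxHeartbeats 4000000 in
lemma pv_w_list : pvDiffWitness_get_emogi.toList = List.replicate 1000 'x' ++ [':', ')'] := by
  decide

lemma pv_w_dom : Dom_get_emogi pvDiffWitness_get_emogi := by
  unfold Dom_get_emogi pvDomStr
  rw [pv_w_list, List.all_eq_true]
  intro c hc
  rw [List.mem_append, List.mem_replicate] at hc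
  rcases hc with h | h
  · rw [h.2]; decide
  · have h2 : c = ':' ∨ c = ')' := by simpa using h
    rcases h2 with h2 | h2 <;> (rw [h2]; decide)

lemma pv_w_drop {i : Nat} (hi : i < 1000) :
    pvDiffWitness_get_emogi.toList.drop i = List.replicate (1000 - i) 'x' ++ [':', ')'] := by
  rw [pv_w_list, List.drop_append, List.drop_replicate, List.length_replicate]
  have h0 : i - 1000 = 0 := by omega
  rw [h0, List.drop_zero]

lemma pv_w_drop1000 : pvDiffWitness_get_emogi.toList.drop 1000 = [':', ')'] := by
  rw [pv_w_list, List.drop_append, List.drop_replicate, List.length_replicate]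
  simp

lemma pv_w_nomatch {i : Nat} (hi : i < 1000) : ¬ pvMatch pvDiffWitness_get_emogi.toList i := by
  intro hm
  obtain ⟨e, he, hp⟩ := (pvMatch_iff _ _).mp hm
  rw [pv_w_drop hi] at hp
  have h1 : 1000 - i = (999 - i) + 1 := by omega
  rw [h1, List.replicate_succ, List.cons_append] at hp
  obtain ⟨t, ht⟩ := hp
  have hh := pv_emoji_head e he
  cases hhc : e.toList with
  | nil => rw [hhc] at hh; simp at hh
  | cons a as =>
    rw [hhc] at hh ht
    have ha : a = ':' := by simpa using hh
    rw [List.cons_append] at ht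
    have hx : a = 'x' := by injection ht
    rw [ha] at hx
    exact absurd hx (by decide)

lemma pv_w_match1000 : pvMatch pvDiffWitness_get_emogi.toList 1000 :=
  (pvMatch_iff _ _).mpr ⟨":)", by decide, by rw [pv_w_drop1000]; decide⟩

lemma pv_w_ex : ∃ i, pvMatch pvDiffWitness_get_emogi.toList i := ⟨1000, pv_w_match1000⟩

lemma pv_w_find : Nat.find pv_w_ex = 1000 :=
  le_antisymm (Nat.find_le pv_w_match1000)
    (Nat.le_of_not_lt (fun hc => pv_w_nomatch hc (Nat.find_spec pv_w_ex)))

set_option maxRecDepth 4096 in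
lemma pv_w_B : get_emogi_alt pvDiffWitness_get_emogi = ":)" := by
  obtain ⟨w, hg, hB⟩ := pv_main pvDiffWitness_get_emogi pv_w_ex
  rw [pv_w_find] at hg
  have hg2 : gB pvDiffWitness_get_emogi.toList 1000 = some ":)" := by
    show pvE.find?
      (fun emoji => PySem.Chars.startswith (pvDiffWitness_get_emogi.toList.drop 1000) emoji.toList)
      = some ":)"
    rw [pv_w_drop1000]
    decide
  rw [hg2] at hg
  rw [hB, Option.some.inj hg]

lemma pv_w_A : get_emogi pvDiffWitness_get_emogi = "" := by
  apply pv_A_empty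
  intro e he hne
  have h := pv_min_le_find pvDiffWitness_get_emogi
    (fun i hi => Nat.find_min pv_w_ex hi) e he hne
  rw [pv_w_find] at h
  omega

lemma pv_w_D : D_get_emogi pvDiffWitness_get_emogi :=
  ⟨(pv_D1_iff _).mpr ⟨1000, pv_w_match1000⟩,
   (pv_D2_iff _).mpr (fun _ hi => pv_w_nomatch hi)⟩

-- ===== VERDICT (by name: the statement is the Claim_ definition above) =====
theorem get_emogi_spec : Claim_unchanged_get_emogi := by
  intro text _ hD
  exact pv_spec text hD

theorem get_emogi_changed : Claim_changed_get_emogi := by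
  unfold Claim_changed_get_emogi
  exact ⟨pv_w_dom, pv_w_D, pv_w_A, pv_w_B, by decide⟩

theorem get_emogi_tight : Claim_exact_get_emogi := by
  intro text _ hD
  exact pv_exact text hD
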